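-- pv_equiv track=rewrite | github.com/Alphabtw00/topg | utils/validators.py | crypto_quick_check
-- ===== SOURCE A (Python) =====
-- def crypto_quick_check(content: str) -> bool:
--     """Lightning fast - ~0.002-0.008ms"""
--     # Check for $ first (most common)
--     if '$' in content:
--         return True
--
--     # Quick length check - if message is too short, no CA possible
--     if len(content) < 26:
--         return False
--
--     # Look for any 26+ char alphanumeric sequence
--     current_alnum_count = 0
--     for char in content:
--         if char.isalnum():
--             current_alnum_count += 1
--             if current_alnum_count >= 26:
--                 return True
--         else:
--             current_alnum_count = 0
--
--     return False
-- ===== SOURCE B (Python) =====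
-- def crypto_quick_check(content: str) -> bool:
--     """Run-scan: jump from one maximal alphanumeric run to the next instead of
--     keeping a running counter over every character."""
--     if '$' in content:
--         return True
--     i, n = 0, len(content)
--     while i < n:
--         if not content[i].isalnum():
--             i += 1
--             continue
--         j = i + 1
--         while j < n and content[j].isalnum():
--             j += 1
--         if j - i >= 26:
--             return True
--         i = j
--     return False
-- ===== Notes on version B (the rewrite author's own statement) =====
-- stated objective: alternative
-- what changed: Replaced the per-character running-counter loop (with its len<26 early exit) by a two-pointer scan that jumps over maximal alphanumeric runs and tests each run's length once.
import Mathlib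
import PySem

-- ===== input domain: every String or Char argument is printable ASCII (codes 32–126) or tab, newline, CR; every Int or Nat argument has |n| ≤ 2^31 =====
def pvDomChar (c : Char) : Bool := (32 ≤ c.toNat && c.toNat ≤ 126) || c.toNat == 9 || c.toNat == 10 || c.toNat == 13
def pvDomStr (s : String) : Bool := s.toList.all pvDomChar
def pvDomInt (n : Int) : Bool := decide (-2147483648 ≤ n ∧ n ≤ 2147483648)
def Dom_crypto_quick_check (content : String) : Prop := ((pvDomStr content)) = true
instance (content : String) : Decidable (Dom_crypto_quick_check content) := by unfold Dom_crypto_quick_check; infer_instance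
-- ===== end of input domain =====

-- B replaces A's per-character running-counter loop by a two-pointer scan over
-- maximal alphanumeric runs (alternative decomposition, same O(n) cost).


-- ===== PORT A =====
-- A's for-loop with the running counter and early returns, as structural recursion
def pvALoop : List Char → Nat → Bool
  | [], _ => false
  | c :: rest, cnt =>
    if PySem.Chars.isalnum c then
      if 26 ≤ cnt + 1 then true else pvALoop rest (cnt + 1)
    else pvALoop rest 0

def crypto_quick_check (content : String) : Bool :=
  if PySem.Str.isIn "$" content then true
  else if content.toList.length < 26 then false
  else pvALoop content.toList 0

-- ===== PORT B =====
-- B's outer while loop; the inner 'while j < n and content[j].isalnum(): j += 1'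
-- (computing the end of the current maximal alphanumeric run) is takeWhile/dropWhile
def pvBLoop : List Char → Bool
  | [] => false
  | c :: rest =>
    if PySem.Chars.isalnum c then
      if 26 ≤ ((c :: rest).takeWhile PySem.Chars.isalnum).length then true
      else pvBLoop ((c :: rest).dropWhile PySem.Chars.isalnum)
    else pvBLoop rest
termination_by l => l.length
decreasing_by
  · simp_all [List.dropWhile]
    exact List.length_dropWhile_le _ _
  · simp

def crypto_quick_check_alt (content : String) : Bool :=
  if PySem.Str.isIn "$" content then true
  else pvBLoop content.toList

-- ===== PRECONDITION & SPEC =====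
def Spec_crypto_quick_check (content : String) (out : Bool) : Prop := out = crypto_quick_check_alt content
instance (content : String) (out : Bool) : Decidable (Spec_crypto_quick_check content out) := by unfold Spec_crypto_quick_check; infer_instance

-- ===== CLAIM (what is proved, stated in full; the proofs are below) =====
def Claim_equal_crypto_quick_check : Prop := ∀ (content : String), Dom_crypto_quick_check content → Spec_crypto_quick_check content (crypto_quick_check content)

-- ===== LEMMAS AND PROOFS =====

-- B's loop, unfolded one run at a time (true for a non-alnum head as well)
theorem pvBLoop_step (l : List Char) :
    pvBLoop l = (decide (26 ≤ (l.takeWhile PySem.Chars.isalnum).length)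
                 || pvBLoop (l.dropWhile PySem.Chars.isalnum)) := by
  cases l with
  | nil => simp [pvBLoop]
  | cons c rest =>
    by_cases h : PySem.Chars.isalnum c
    · rw [pvBLoop, if_pos h]
      split_ifs with h26
      · rw [decide_eq_true h26, Bool.true_or]
      · rw [decide_eq_false h26, Bool.false_or]
    · simp [pvBLoop, List.takeWhile, List.dropWhile, h]

-- A's counter loop in terms of the first maximal run and B's loop on the rest
theorem pvALoop_eq (l : List Char) (k : Nat) (hk : k < 26) :
    pvALoop l k = (decide (26 ≤ k + (l.takeWhile PySem.Chars.isalnum).length)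
                   || pvBLoop (l.dropWhile PySem.Chars.isalnum)) := by
  induction l generalizing k with
  | nil => simp [pvALoop, pvBLoop]; omega
  | cons c rest ih =>
    by_cases h : PySem.Chars.isalnum c
    · rw [pvALoop, if_pos h, List.takeWhile_cons_of_pos h, List.dropWhile_cons_of_pos h,
        List.length_cons]
      by_cases h26 : 26 ≤ k + 1
      · rw [if_pos h26, decide_eq_true (by omega), Bool.true_or]
      · rw [if_neg h26, ih (k + 1) (by omega)]
        congr 1
        exact decide_eq_decide.mpr (by omega)
    · rw [pvALoop, if_neg h, ih 0 (by omega),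
        List.takeWhile_cons_of_neg h, List.dropWhile_cons_of_neg h]
      have hb : pvBLoop (c :: rest) = pvBLoop rest := by rw [pvBLoop, if_neg h]
      rw [hb, pvBLoop_step rest, List.length_nil, Nat.zero_add,
        decide_eq_false (by omega : ¬ 26 ≤ k + 0), Bool.false_or]

-- a list shorter than 26 has no run of length 26
theorem pvBLoop_short (n : Nat) : ∀ l : List Char, l.length ≤ n → l.length < 26 → pvBLoop l = false := by
  induction n with
  | zero =>
    intro l hl _
    cases l with
    | nil => simp [pvBLoop]
    | cons c rest => simp at hl
  | succ n ih =>
    intro l hl hlt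
    cases l with
    | nil => simp [pvBLoop]
    | cons c rest =>
      by_cases h : PySem.Chars.isalnum c
      · rw [pvBLoop, if_pos h]
        have htk : ((c :: rest).takeWhile PySem.Chars.isalnum).length ≤ (c :: rest).length :=
          (List.takeWhile_prefix _).length_le
        rw [if_neg (by omega)]
        rw [List.dropWhile_cons_of_pos h]
        have hdw : (rest.dropWhile PySem.Chars.isalnum).length ≤ rest.length :=
          (List.dropWhile_suffix _).length_le
        simp only [List.length_cons] at hl hlt
        exact ih _ (by omega) (by omega)
      · rw [pvBLoop, if_neg h]
        simp only [List.length_cons] at hl hlt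
        exact ih rest (by omega) (by omega)

-- ===== VERDICT (by name: the statement is the Claim_ definition above) =====
theorem crypto_quick_check_spec : Claim_equal_crypto_quick_check := by
  intro content _
  unfold Spec_crypto_quick_check crypto_quick_check crypto_quick_check_alt
  by_cases hdol : PySem.Str.isIn "$" content
  · rw [if_pos hdol, if_pos hdol]
  · rw [if_neg hdol, if_neg hdol]
    by_cases hlen : content.toList.length < 26
    · rw [if_pos hlen, pvBLoop_short content.toList.length _ le_rfl hlen]
    · rw [if_neg hlen, pvALoop_eq _ 0 (by omega), pvBLoop_step content.toList]
      norm_num
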